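-- pv_equiv track=rewrite | github.com/a071130-jihun/ai_analyze | clean_cache_data.py | find_short_segments
-- ===== SOURCE A (Python) =====
-- def find_short_segments(labels, min_length=3):
--     """짧은 연속 구간 찾기 (min_length 미만)"""
--     short_indices = set()
--
--     i = 0
--     while i < len(labels):
--         current_label = labels[i]
--         segment_start = i
--
--         while i < len(labels) and labels[i] == current_label:
--             i += 1
--
--         segment_length = i - segment_start
--
--         if segment_length < min_length:
--             for j in range(segment_start, i):
--                 short_indices.add(j)
--
--     return sorted(short_indices)
-- ===== SOURCE B (Python) =====
-- def find_short_segments(labels, min_length=3):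
--     """Two-pass: materialize run boundaries, then emit indices of short segments."""
--     n = len(labels)
--     boundaries = [0] + [i for i in range(1, n) if labels[i] != labels[i - 1]] + [n]
--     result = []
--     for s, e in zip(boundaries, boundaries[1:]):
--         if e - s < min_length:
--             result.extend(range(s, e))
--     return result
-- ===== Notes on version B (the rewrite author's own statement) =====
-- stated objective: alternative
-- what changed: Replaces A's interleaved while-loop run scan that accumulates a set and sorts it with two separate passes: first materialize a boundaries table, then emit range(s, e) for each consecutive boundary pair with e - s < min_length, returning the already-increasing list directly with no set and no sort.
import Mathlib
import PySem

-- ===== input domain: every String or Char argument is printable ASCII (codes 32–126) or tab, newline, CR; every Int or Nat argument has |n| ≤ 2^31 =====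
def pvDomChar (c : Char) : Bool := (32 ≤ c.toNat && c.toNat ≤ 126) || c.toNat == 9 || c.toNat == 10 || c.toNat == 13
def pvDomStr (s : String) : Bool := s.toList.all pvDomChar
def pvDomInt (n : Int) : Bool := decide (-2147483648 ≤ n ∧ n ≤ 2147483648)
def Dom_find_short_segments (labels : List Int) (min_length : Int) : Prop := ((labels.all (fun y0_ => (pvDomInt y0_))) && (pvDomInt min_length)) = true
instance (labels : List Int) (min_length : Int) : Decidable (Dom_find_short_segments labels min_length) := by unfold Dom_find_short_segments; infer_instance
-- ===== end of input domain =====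

-- B replaces A's interleaved run scan + set + sort by two passes: a materialized
-- boundaries table, then emission over consecutive boundary pairs (alternative decomposition).


-- ===== PORT A =====
-- inner while: 'while i < len(labels) and labels[i] == current_label: i += 1'
-- (labels[i] is accessed only under the guard i < len(labels), so getD is exact there)
def runEndA (labels : List Int) (cur : Int) (i : Nat) : Nat :=
  if h : i < labels.length ∧ labels.getD i 0 = cur then runEndA labels cur (i + 1) else i
termination_by labels.length - i
decreasing_by omega

theorem le_runEndA (labels : List Int) (cur : Int) (i : Nat) : i ≤ runEndA labels cur i := by
  unfold runEndA
  split
  · exact le_trans (by omega) (le_runEndA labels cur (i + 1))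
  · exact le_refl i
termination_by labels.length - i
decreasing_by rename_i h; omega

theorem runEndA_succ (labels : List Int) (cur : Int) (i : Nat) (h : i < labels.length)
    (hc : labels.getD i 0 = cur) : runEndA labels cur i = runEndA labels cur (i + 1) := by
  rw [runEndA]; exact dif_pos ⟨h, hc⟩

theorem lt_runEndA (labels : List Int) (cur : Int) (i : Nat) (h : i < labels.length)
    (hc : labels.getD i 0 = cur) : i < runEndA labels cur i := by
  rw [runEndA_succ labels cur i h hc]
  exact Nat.lt_of_lt_of_le (Nat.lt_succ_self i) (le_runEndA labels cur (i + 1))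

theorem runEndA_le (labels : List Int) (cur : Int) (i : Nat) (h : i ≤ labels.length) :
    runEndA labels cur i ≤ labels.length := by
  unfold runEndA
  split
  · exact runEndA_le labels cur (i + 1) (by omega)
  · exact h
termination_by labels.length - i
decreasing_by rename_i h'; omega

-- outer while loop of A, state = (i, short_indices)
def goA (labels : List Int) (min_length : Int) (i : Nat) (acc : PySem.Set Int) : PySem.Set Int :=
  if h : i < labels.length then
    let current := labels.getD i 0
    let e := runEndA labels current i
    let acc' := if ((e : Int) - (i : Int)) < min_length
                then PySem.Set.update acc (PySem.List.pyRange (i : Int) (e : Int) 1)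
                else acc
    goA labels min_length e acc'
  else acc
termination_by labels.length - i
decreasing_by
  have h1 := lt_runEndA labels (labels.getD i 0) i h rfl
  have h2 := runEndA_le labels (labels.getD i 0) i (by omega)
  omega

def find_short_segments (labels : List Int) (min_length : Int) : List Int :=
  PySem.List.sorted (goA labels min_length 0 PySem.Set.empty) (fun x => x) false

-- ===== PORT B =====
def find_short_segments_alt (labels : List Int) (min_length : Int) : List Int :=
  let n : Int := labels.length
  -- boundaries = [0] + [i for i in range(1, n) if labels[i] != labels[i-1]] + [n]
  -- (both indices i, i-1 lie in range there, so pyGetD is exact)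
  let boundaries : List Int :=
    (0 :: (PySem.List.pyRange 1 n 1).filter
        (fun i => PySem.List.pyGetD labels i 0 != PySem.List.pyGetD labels (i - 1) 0)) ++ [n]
  -- for s, e in zip(boundaries, boundaries[1:]): if e - s < min_length: result.extend(range(s, e))
  (boundaries.zip boundaries.tail).foldl
    (fun acc p => if p.2 - p.1 < min_length then acc ++ PySem.List.pyRange p.1 p.2 1 else acc) []

-- ===== PRECONDITION & SPEC =====
def Spec_find_short_segments (labels : List Int) (min_length : Int) (out : List Int) : Prop := out = find_short_segments_alt labels min_length
instance (labels : List Int) (min_length : Int) (out : List Int) : Decidable (Spec_find_short_segments labels min_length out) := by unfold Spec_find_short_segments; infer_instance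

-- ===== CLAIM (what is proved, stated in full; the proofs are below) =====
def Claim_equal_find_short_segments : Prop := ∀ (labels : List Int) (min_length : Int), Dom_find_short_segments labels min_length → Spec_find_short_segments labels min_length (find_short_segments labels min_length)

-- ===== LEMMAS AND PROOFS =====

-- the list of indices both programs emit, run by run, starting at position i
def emitRuns (labels : List Int) (m : Int) (i : Nat) : List Int :=
  if h : i < labels.length then
    let e := runEndA labels (labels.getD i 0) i
    (if ((e : Int) - (i : Int)) < m then PySem.List.pyRange (i : Int) (e : Int) 1 else []) ++
      emitRuns labels m e
  else []
termination_by labels.length - i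
decreasing_by
  have h1 := lt_runEndA labels (labels.getD i 0) i h rfl
  have h2 := runEndA_le labels (labels.getD i 0) i (by omega)
  omega

-- inside the run everything equals cur
theorem runEndA_run (labels : List Int) (cur : Int) (i j : Nat) (hij : i ≤ j)
    (hj : j < runEndA labels cur i) : labels.getD j 0 = cur := by
  rw [runEndA] at hj
  split at hj
  · rename_i hc
    rcases Nat.eq_or_lt_of_le hij with h | h
    · exact h ▸ hc.2
    · exact runEndA_run labels cur (i + 1) j h hj
  · omega
termination_by labels.length - i
decreasing_by rename_i hc; omega

-- the run stops at the first difference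
theorem runEndA_stop (labels : List Int) (cur : Int) (i : Nat)
    (h : runEndA labels cur i < labels.length) : labels.getD (runEndA labels cur i) 0 ≠ cur := by
  by_cases hc : i < labels.length ∧ labels.getD i 0 = cur
  · rw [runEndA_succ labels cur i hc.1 hc.2] at h ⊢
    exact runEndA_stop labels cur (i + 1) h
  · have he : runEndA labels cur i = i := by rw [runEndA]; exact dif_neg hc
    rw [he] at h ⊢
    intro hcur
    exact hc ⟨h, hcur⟩
termination_by labels.length - i
decreasing_by rename_i _hc; omega

-- Set.update by fresh nodup elements is append
theorem set_update_fresh (acc : PySem.Set Int) (xs : List Int) (hnd : xs.Nodup)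
    (hf : ∀ x ∈ xs, x ∉ acc) : PySem.Set.update acc xs = acc ++ xs := by
  induction xs generalizing acc with
  | nil => simp [PySem.Set.update]
  | cons x t ih =>
    have hx : PySem.Set.add acc x = acc ++ [x] := by
      simp only [PySem.Set.add, PySem.Set.contains]
      rw [if_neg]
      simp only [List.contains_iff_mem]
      exact fun hmem => hf x (by simp) hmem
    have : PySem.Set.update acc (x :: t) = PySem.Set.update (acc ++ [x]) t := by
      simp [PySem.Set.update, List.foldl_cons, hx]
    rw [this, ih (acc ++ [x]) (List.Nodup.of_cons hnd)]
    · simp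
    · intro y hy
      simp only [List.mem_append, List.mem_singleton]
      rintro (h | rfl)
      · exact hf y (by simp [hy]) h
      · exact (List.nodup_cons.mp hnd).1 hy

theorem mem_emitRuns_ge (labels : List Int) (m : Int) (i : Nat) (x : Int)
    (hx : x ∈ emitRuns labels m i) : (i : Int) ≤ x := by
  rw [emitRuns] at hx
  split at hx
  · rename_i h
    simp only [List.mem_append] at hx
    rcases hx with hx | hx
    · split at hx
      · exact (PySem.List.mem_pyRange_one.mp hx).1
      · simp at hx
    · have he := le_runEndA labels (labels.getD i 0) i
      have := mem_emitRuns_ge labels m (runEndA labels (labels.getD i 0) i) x hx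
      omega
  · simp at hx
termination_by labels.length - i
decreasing_by
  have h : i < labels.length := by assumption
  have h1 := lt_runEndA labels (labels.getD i 0) i h rfl
  have h2 := runEndA_le labels (labels.getD i 0) i (by omega)
  omega

theorem emitRuns_pairwise (labels : List Int) (m : Int) (i : Nat) :
    (emitRuns labels m i).Pairwise (· < ·) := by
  rw [emitRuns]
  split
  · rename_i h
    rw [List.pairwise_append]
    refine ⟨?_, emitRuns_pairwise labels m _, ?_⟩
    · split
      · exact PySem.List.pairwise_lt_pyRange_one _ _
      · exact List.Pairwise.nil
    · intro a ha b hb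
      have hbge := mem_emitRuns_ge labels m _ b hb
      split at ha
      · have := (PySem.List.mem_pyRange_one.mp ha).2
        omega
      · simp at ha
  · exact List.Pairwise.nil
termination_by labels.length - i
decreasing_by
  have h : i < labels.length := by assumption
  have h1 := lt_runEndA labels (labels.getD i 0) i h rfl
  have h2 := runEndA_le labels (labels.getD i 0) i (by omega)
  omega

theorem goA_eq (labels : List Int) (m : Int) (i : Nat) (acc : PySem.Set Int)
    (hacc : ∀ x ∈ acc, x < (i : Int)) :
    goA labels m i acc = acc ++ emitRuns labels m i := by
  by_cases h : i < labels.length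
  · have h1 := lt_runEndA labels (labels.getD i 0) i h rfl
    have h2 := runEndA_le labels (labels.getD i 0) i (by omega)
    have hgo : goA labels m i acc
        = goA labels m (runEndA labels (labels.getD i 0) i)
            (if ((runEndA labels (labels.getD i 0) i : Int) - (i : Int)) < m
              then PySem.Set.update acc
                (PySem.List.pyRange (i : Int) (runEndA labels (labels.getD i 0) i : Int) 1)
              else acc) := by
      rw [goA, dif_pos h]
    have her : emitRuns labels m i
        = (if ((runEndA labels (labels.getD i 0) i : Int) - (i : Int)) < m
            then PySem.List.pyRange (i : Int) (runEndA labels (labels.getD i 0) i : Int) 1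
            else []) ++ emitRuns labels m (runEndA labels (labels.getD i 0) i) := by
      rw [emitRuns, dif_pos h]
    set e := runEndA labels (labels.getD i 0) i with he
    have hstep :
        (if ((e : Int) - (i : Int)) < m
          then PySem.Set.update acc (PySem.List.pyRange (i : Int) (e : Int) 1)
          else acc)
        = acc ++ (if ((e : Int) - (i : Int)) < m
          then PySem.List.pyRange (i : Int) (e : Int) 1 else []) := by
      split
      · exact set_update_fresh acc _ (PySem.List.nodup_pyRange_one _ _)
          (fun x hx hmem => by
            have := (PySem.List.mem_pyRange_one.mp hx).1
            have := hacc x hmem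
            omega)
      · simp
    rw [hgo, hstep, her]
    rw [goA_eq labels m e _ ?_]
    · rw [List.append_assoc]
    · intro x hx
      simp only [List.mem_append] at hx
      rcases hx with hx | hx
      · have := hacc x hx; omega
      · split at hx
        · exact (PySem.List.mem_pyRange_one.mp hx).2
        · simp at hx
  · rw [goA, dif_neg h, emitRuns, dif_neg h]
    simp
termination_by labels.length - i
decreasing_by omega

-- ===== B side =====

def predB (labels : List Int) : Int → Bool :=
  fun i => PySem.List.pyGetD labels i 0 != PySem.List.pyGetD labels (i - 1) 0

def bnds (labels : List Int) (s : Nat) : List Int :=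
  ((s : Int) :: (PySem.List.pyRange ((s : Int) + 1) (labels.length : Int) 1).filter (predB labels))
    ++ [(labels.length : Int)]

def emitB (m : Int) (bl : List Int) : List Int :=
  (bl.zip bl.tail).foldl
    (fun acc p => if p.2 - p.1 < m then acc ++ PySem.List.pyRange p.1 p.2 1 else acc) []

-- closed form of B's emission loop
theorem emitB_eq_flatMap (m : Int) (bl : List Int) :
    emitB m bl = ((bl.zip bl.tail).filter (fun p => decide (p.2 - p.1 < m))).flatMap
      (fun p => PySem.List.pyRange p.1 p.2 1) := by
  unfold emitB
  rw [PySem.List.foldl_ite_eq_foldl_filter, PySem.List.foldl_append_eq_flatMap]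
  simp

-- inside a run, no index is a boundary
theorem filt_run_nil (labels : List Int) (s : Nat) :
    (PySem.List.pyRange ((s : Int) + 1)
        ((runEndA labels (labels.getD s 0) s : Nat) : Int) 1).filter (predB labels) = [] := by
  rw [List.filter_eq_nil_iff]
  intro a ha
  have hmem := PySem.List.mem_pyRange_one.mp ha
  have h3 : a.toNat < runEndA labels (labels.getD s 0) s := by omega
  have h4 : (a - 1).toNat < runEndA labels (labels.getD s 0) s := by omega
  have e1 : labels.getD a.toNat 0 = labels.getD s 0 :=
    runEndA_run labels (labels.getD s 0) s a.toNat (by omega) h3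
  have e2 : labels.getD (a - 1).toNat 0 = labels.getD s 0 :=
    runEndA_run labels (labels.getD s 0) s (a - 1).toNat (by omega) h4
  simp only [predB, PySem.List.pyGetD_of_nonneg labels 0 (by omega : (0:Int) ≤ a),
    PySem.List.pyGetD_of_nonneg labels 0 (by omega : (0:Int) ≤ a - 1), e1, e2]
  simp

theorem bnds_step (labels : List Int) (s : Nat) (hs : s < labels.length)
    (hend : runEndA labels (labels.getD s 0) s < labels.length) :
    bnds labels s = (s : Int) :: bnds labels (runEndA labels (labels.getD s 0) s) := by
  have h1 := lt_runEndA labels (labels.getD s 0) s hs rfl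
  set e := runEndA labels (labels.getD s 0) s with he
  have hsplit : PySem.List.pyRange ((s : Int) + 1) (labels.length : Int) 1
      = PySem.List.pyRange ((s : Int) + 1) ((e : Int)) 1
        ++ PySem.List.pyRange ((e : Int)) (labels.length : Int) 1 := by
    exact PySem.List.pyRange_one_append _ _ _ (by omega) (by omega)
  have hcons : PySem.List.pyRange ((e : Int)) (labels.length : Int) 1
      = ((e : Int)) :: PySem.List.pyRange (((e : Int)) + 1) (labels.length : Int) 1 :=
    PySem.List.pyRange_one_cons (by omega)
  have hpredE : predB labels ((e : Int)) = true := by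
    have hne : labels.getD e 0 ≠ labels.getD s 0 := runEndA_stop labels (labels.getD s 0) s hend
    have e2 : labels.getD ((e : Int) - 1).toNat 0 = labels.getD s 0 :=
      runEndA_run labels (labels.getD s 0) s ((e : Int) - 1).toNat (by omega) (by omega)
    simp only [predB, PySem.List.pyGetD_of_nonneg labels 0 (by omega : (0:Int) ≤ (e : Int)),
      PySem.List.pyGetD_of_nonneg labels 0 (by omega : (0:Int) ≤ (e : Int) - 1)]
    simp only [Int.toNat_natCast, e2]
    simpa using hne
  unfold bnds
  rw [hsplit, List.filter_append, filt_run_nil labels s, hcons]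
  simp [hpredE]

theorem emitB_bnds (labels : List Int) (m : Int) (s : Nat) (hs : s ≤ labels.length) :
    emitB m (bnds labels s) = emitRuns labels m s := by
  by_cases h : s < labels.length
  · have h1 := lt_runEndA labels (labels.getD s 0) s h rfl
    have h2 := runEndA_le labels (labels.getD s 0) s (by omega)
    have her : emitRuns labels m s
        = (if ((runEndA labels (labels.getD s 0) s : Int) - (s : Int)) < m
            then PySem.List.pyRange (s : Int) (runEndA labels (labels.getD s 0) s : Int) 1
            else []) ++ emitRuns labels m (runEndA labels (labels.getD s 0) s) := by
      rw [emitRuns, dif_pos h]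
    set e := runEndA labels (labels.getD s 0) s with he
    by_cases hend : e < labels.length
    · -- the run ends before the end of the list: bnds s = s :: bnds e
      rw [bnds_step labels s h hend, ← he, her]
      have hbe : bnds labels e = ((e : Int))
          :: ((PySem.List.pyRange ((e : Int) + 1) (labels.length : Int) 1).filter (predB labels)
              ++ [(labels.length : Int)]) := by
        unfold bnds; simp
      have hzip : ((s : Int) :: bnds labels e).zip ((s : Int) :: bnds labels e).tail
          = ((s : Int), ((e : Int))) :: (bnds labels e).zip (bnds labels e).tail := by
        rw [hbe]; rfl
      have key : emitB m ((s : Int) :: bnds labels e)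
          = (if ((e : Int) - (s : Int)) < m
              then PySem.List.pyRange (s : Int) ((e : Int)) 1 else [])
            ++ emitB m (bnds labels e) := by
        rw [emitB_eq_flatMap, emitB_eq_flatMap, hzip, List.filter_cons]
        by_cases hm : ((e : Int) - (s : Int)) < m
        · simp [hm]
        · simp [hm]
      rw [key, emitB_bnds labels m e (by omega)]
    · -- the run reaches the end of the list: bnds s = [s, n] with e = n
      have hen : e = labels.length := by omega
      have hfilt : (PySem.List.pyRange ((s : Int) + 1) (labels.length : Int) 1).filter
          (predB labels) = [] := by
        have := filt_run_nil labels s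
        rw [← he, hen] at this
        exact this
      have hbs : bnds labels s = [(s : Int), (labels.length : Int)] := by
        unfold bnds; rw [hfilt]; rfl
      have hre : emitRuns labels m e = [] := by
        rw [emitRuns, dif_neg (by omega)]
      rw [hbs, her, hre, hen]
      rw [emitB_eq_flatMap]
      by_cases hm : ((labels.length : Int) - (s : Int)) < m
      · simp [List.zip, hm]
      · simp [List.zip, hm]
  · -- s = length: bnds s = [n, n]; both sides are empty
    have hsn : s = labels.length := by omega
    have hfilt : (PySem.List.pyRange ((s : Int) + 1) (labels.length : Int) 1).filter
        (predB labels) = [] := by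
      rw [PySem.List.pyRange_one_eq_nil (by omega)]; rfl
    have hbs : bnds labels s = [(s : Int), (labels.length : Int)] := by
      unfold bnds; rw [hfilt]; rfl
    rw [hbs, emitRuns, dif_neg h, emitB_eq_flatMap]
    have : PySem.List.pyRange (s : Int) (labels.length : Int) 1 = [] :=
      PySem.List.pyRange_one_eq_nil (by omega)
    by_cases hm : ((labels.length : Int) - (s : Int)) < m
    · simp [List.zip, hm, this]
    · simp [List.zip, hm]
termination_by labels.length - s
decreasing_by omega

-- ===== VERDICT (by name: the statement is the Claim_ definition above) =====
theorem find_short_segments_spec : Claim_equal_find_short_segments := by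
  intro labels m _
  unfold Spec_find_short_segments
  have hA : find_short_segments labels m = emitRuns labels m 0 := by
    unfold find_short_segments
    rw [goA_eq labels m 0 PySem.Set.empty (by intro x hx; simp [PySem.Set.empty] at hx)]
    exact PySem.List.sorted_eq_of_perm_of_pairwise_lt _ _ _ (List.Perm.refl _)
      (emitRuns_pairwise labels m 0)
  have hB : find_short_segments_alt labels m = emitB m (bnds labels 0) := by
    unfold find_short_segments_alt emitB bnds predB
    norm_num
  rw [hA, hB, emitB_bnds labels m 0 (Nat.zero_le _)]
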